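-- pv_equiv track=rewrite | github.com/the-omega-institute/automath | theory/2026_golden_ratio_driven_scan_projection_generation_recursive_emergence/scripts/exp_fold_zm_trace_galois_audit.py | _subgroup_generated
-- ===== SOURCE A (Python) =====
-- from typing import Dict, Iterable, List, Sequence, Tuple
--
-- Perm = Tuple[int, int, int, int]  # 0-based images of 0..3
--
-- def _perm_id() -> Perm:
--     return (0, 1, 2, 3)
--
-- def _perm_compose(p: Perm, q: Perm) -> Perm:
--     # Composition p ∘ q (apply q, then p).
--     return (p[q[0]], p[q[1]], p[q[2]], p[q[3]])
--
-- def _subgroup_generated(gens: Sequence[Perm]) -> set[Perm]: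
--     # In a finite group, the semigroup generated by gens equals the subgroup generated by gens.
--     seen: set[Perm] = {_perm_id()}
--     q: List[Perm] = [_perm_id()]
--     while q:
--         a = q.pop()
--         for g in gens:
--             b = _perm_compose(a, g)
--             if b not in seen:
--                 seen.add(b)
--                 q.append(b)
--     return seen
-- ===== SOURCE B (Python) =====
-- from typing import Sequence, Tuple
--
-- Perm = Tuple[int, int, int, int]
--
-- def _subgroup_generated(gens: Sequence[Perm]) -> set[Perm]:
--     # Round-based fixpoint: repeatedly rescan the whole accumulated set,
--     # composing every known element with every generator, until no round
--     # adds anything new.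
--     seen: set[Perm] = {(0, 1, 2, 3)}
--     while True:
--         new = {(a[g[0]], a[g[1]], a[g[2]], a[g[3]]) for a in seen for g in gens}
--         if new <= seen:
--             return seen
--         seen |= new
-- ===== Notes on version B (the rewrite author's own statement) =====
-- stated objective: alternative
-- what changed: Replaces A's worklist/stack search (pop an element, compose with generators, push the new ones) with a round-based fixpoint that recomputes the full composition set over the whole accumulated set each round and stops when a round adds nothing new.
import Mathlib
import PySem

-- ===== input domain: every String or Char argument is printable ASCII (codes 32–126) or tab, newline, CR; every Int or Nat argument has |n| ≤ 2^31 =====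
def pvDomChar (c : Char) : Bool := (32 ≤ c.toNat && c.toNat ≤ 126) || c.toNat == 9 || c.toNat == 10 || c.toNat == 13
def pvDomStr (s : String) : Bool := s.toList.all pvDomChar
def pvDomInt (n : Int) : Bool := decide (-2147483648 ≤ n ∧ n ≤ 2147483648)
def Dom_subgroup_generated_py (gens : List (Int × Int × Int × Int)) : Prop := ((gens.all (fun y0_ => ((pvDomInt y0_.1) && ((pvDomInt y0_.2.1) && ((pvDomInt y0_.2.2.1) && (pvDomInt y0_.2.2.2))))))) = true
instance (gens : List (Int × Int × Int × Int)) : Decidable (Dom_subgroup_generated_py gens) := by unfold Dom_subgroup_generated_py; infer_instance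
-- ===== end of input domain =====

-- B replaces A's worklist/stack closure search with a round-based fixpoint that rescans the
-- whole accumulated set each round (alternative decomposition, not claimed faster).
-- Both Pythons return a SET; per the type convention each port returns the set's distinct
-- elements, canonicalized by sorting with a key injective on the set, so that the list-level
-- equality below states equality of the two sets.

-- ===== PORT A =====
-- Python tuple indexing p[i] for a 4-tuple, exact for i ∈ [-4,4) (negative = from the end);
-- outside that range Python raises IndexError — those inputs are excluded by Pre_ (default 0 never reached there).
def tupGet (p : Int × Int × Int × Int) (i : Int) : Int :=
  if i = 0 ∨ i = -4 then p.1
  else if i = 1 ∨ i = -3 then p.2.1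
  else if i = 2 ∨ i = -2 then p.2.2.1
  else if i = 3 ∨ i = -1 then p.2.2.2
  else 0

-- _perm_compose(p, q) = (p[q[0]], p[q[1]], p[q[2]], p[q[3]])
def permCompose (p q : Int × Int × Int × Int) : Int × Int × Int × Int :=
  (tupGet p q.1, tupGet p q.2.1, tupGet p q.2.2.1, tupGet p q.2.2.2)

-- _perm_id()
def permId : Int × Int × Int × Int := (0, 1, 2, 3)

-- the inner 'for g in gens: b = compose(a, g); if b not in seen: seen.add(b); q.append(b)'
-- (the stack q is kept top-at-head: q.pop() = head, q.append = cons)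
def stepA (a : Int × Int × Int × Int)
    (st : PySem.Set (Int × Int × Int × Int) × List (Int × Int × Int × Int))
    (g : Int × Int × Int × Int) :
    PySem.Set (Int × Int × Int × Int) × List (Int × Int × Int × Int) :=
  let b := permCompose a g
  if PySem.Set.contains st.1 b then st else (PySem.Set.add st.1 b, b :: st.2)

-- 'while q: a = q.pop(); for g in gens: …' — fuel-guarded (fuel 300 provably suffices under Pre_)
def loopA (gens : List (Int × Int × Int × Int)) :
    Nat → PySem.Set (Int × Int × Int × Int) → List (Int × Int × Int × Int) →
    PySem.Set (Int × Int × Int × Int)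
  | 0, seen, _ => seen
  | f + 1, seen, q =>
    match q with
    | [] => seen
    | a :: rest =>
      let st := gens.foldl (stepA a) (seen, rest)
      loopA gens f st.1 st.2

-- canonical list representation of the returned set (key injective on the set's elements)
def sortPerm (l : List (Int × Int × Int × Int)) : List (Int × Int × Int × Int) :=
  PySem.List.sorted l (fun p => ((p.1 * 4 + p.2.1) * 4 + p.2.2.1) * 4 + p.2.2.2) false

def subgroup_generated_py (gens : List (Int × Int × Int × Int)) : List (Int × Int × Int × Int) :=
  sortPerm (loopA gens 300 (PySem.Set.ofList [permId]) [permId])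

-- ===== PORT B =====
-- new = {(a[g[0]], a[g[1]], a[g[2]], a[g[3]]) for a in seen for g in gens}
def roundB (gens : List (Int × Int × Int × Int)) (seen : PySem.Set (Int × Int × Int × Int)) :
    PySem.Set (Int × Int × Int × Int) :=
  PySem.Set.ofList (seen.flatMap (fun a => gens.map (fun g => permCompose a g)))

-- 'while True: new = …; if new <= seen: return seen; seen |= new' — fuel-guarded (300 suffices under Pre_)
def loopB (gens : List (Int × Int × Int × Int)) :
    Nat → PySem.Set (Int × Int × Int × Int) → PySem.Set (Int × Int × Int × Int)
  | 0, seen => seen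
  | f + 1, seen =>
    let new := roundB gens seen
    if PySem.Set.issubset new seen then seen
    else loopB gens f (PySem.Set.update seen new)

def subgroup_generated_py_alt (gens : List (Int × Int × Int × Int)) : List (Int × Int × Int × Int) :=
  sortPerm (loopB gens 300 (PySem.Set.ofList [permId]))

-- ===== PRECONDITION & SPEC =====
def inRange4 (g : Int × Int × Int × Int) : Bool :=
  decide ((-4 ≤ g.1 ∧ g.1 < 4) ∧ (-4 ≤ g.2.1 ∧ g.2.1 < 4) ∧ (-4 ≤ g.2.2.1 ∧ g.2.2.1 < 4) ∧ (-4 ≤ g.2.2.2 ∧ g.2.2.2 < 4))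

-- Pre_ excludes exactly the inputs on which A raises IndexError: a generator with a component
-- outside [-4,4) is used as an index into a 4-tuple on the very first iteration (a = identity).
def Pre_subgroup_generated_py (gens : List (Int × Int × Int × Int)) : Prop :=
  ∀ g ∈ gens, inRange4 g = true
instance (gens : List (Int × Int × Int × Int)) : Decidable (Pre_subgroup_generated_py gens) := by
  unfold Pre_subgroup_generated_py; infer_instance

def pvWitness_subgroup_generated_py : (List (Int × Int × Int × Int)) := [(1, 0, 2, 3), (0, 2, 1, 3)]

def Spec_subgroup_generated_py (gens : List (Int × Int × Int × Int)) (out : List (Int × Int × Int × Int)) : Prop := out = subgroup_generated_py_alt gens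
instance (gens : List (Int × Int × Int × Int)) (out : List (Int × Int × Int × Int)) : Decidable (Spec_subgroup_generated_py gens out) := by unfold Spec_subgroup_generated_py; infer_instance

-- ===== CLAIM (what is proved, stated in full; the proofs are below) =====
def Claim_equal_subgroup_generated_py : Prop := ∀ (gens : List (Int × Int × Int × Int)), Dom_subgroup_generated_py gens → Pre_subgroup_generated_py gens → Spec_subgroup_generated_py gens (subgroup_generated_py gens)

-- ===== LEMMAS AND PROOFS =====

-- the closure both programs compute: everything reachable from the identity by right-composition
inductive Reach (gens : List (Int × Int × Int × Int)) : (Int × Int × Int × Int) → Prop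
  | id : Reach gens permId
  | step {a g : Int × Int × Int × Int} : Reach gens a → g ∈ gens → Reach gens (permCompose a g)

-- elements produced by the search all have components in [0,4)
def goodP (p : Int × Int × Int × Int) : Prop :=
  (0 ≤ p.1 ∧ p.1 < 4) ∧ (0 ≤ p.2.1 ∧ p.2.1 < 4) ∧ (0 ≤ p.2.2.1 ∧ p.2.2.1 < 4) ∧ (0 ≤ p.2.2.2 ∧ p.2.2.2 < 4)

theorem tupGet_good {p : Int × Int × Int × Int} (hp : goodP p) (i : Int) :
    0 ≤ tupGet p i ∧ tupGet p i < 4 := by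
  obtain ⟨h1, h2, h3, h4⟩ := hp
  unfold tupGet; split_ifs <;> omega

theorem goodP_compose {a g : Int × Int × Int × Int} (ha : goodP a) : goodP (permCompose a g) :=
  ⟨tupGet_good ha _, tupGet_good ha _, tupGet_good ha _, tupGet_good ha _⟩

theorem goodP_id : goodP permId := by unfold goodP permId; norm_num

-- all 256 quadruples over {0,1,2,3}
def allGood : List (Int × Int × Int × Int) :=
  (List.range 4).flatMap (fun (a : Nat) => (List.range 4).flatMap (fun (b : Nat) =>
    (List.range 4).flatMap (fun (c : Nat) => (List.range 4).map (fun (d : Nat) =>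
      ((a : Int), (b : Int), (c : Int), (d : Int))))))

theorem mem_allGood {p : Int × Int × Int × Int} (hp : goodP p) : p ∈ allGood := by
  obtain ⟨pa, pb, pc, pd⟩ := p
  obtain ⟨h1, h2, h3, h4⟩ := hp
  simp only at h1 h2 h3 h4
  obtain ⟨n1, hn1, rfl⟩ : ∃ n : Nat, n < 4 ∧ pa = (n : Int) := ⟨pa.toNat, by omega, by omega⟩
  obtain ⟨n2, hn2, rfl⟩ : ∃ n : Nat, n < 4 ∧ pb = (n : Int) := ⟨pb.toNat, by omega, by omega⟩
  obtain ⟨n3, hn3, rfl⟩ : ∃ n : Nat, n < 4 ∧ pc = (n : Int) := ⟨pc.toNat, by omega, by omega⟩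
  obtain ⟨n4, hn4, rfl⟩ : ∃ n : Nat, n < 4 ∧ pd = (n : Int) := ⟨pd.toNat, by omega, by omega⟩
  exact List.mem_flatMap.mpr ⟨n1, List.mem_range.mpr hn1,
    List.mem_flatMap.mpr ⟨n2, List.mem_range.mpr hn2,
      List.mem_flatMap.mpr ⟨n3, List.mem_range.mpr hn3,
        List.mem_map.mpr ⟨n4, List.mem_range.mpr hn4, rfl⟩⟩⟩⟩

theorem length_le_256 {l : List (Int × Int × Int × Int)} (hn : l.Nodup)
    (hg : ∀ x ∈ l, goodP x) : l.length ≤ 256 := by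
  have hsub : l ⊆ allGood := fun x hx => mem_allGood (hg x hx)
  have := (hn.subperm hsub).length_le
  simpa [allGood] using this

theorem reach_mem {gens : List (Int × Int × Int × Int)} {s : List (Int × Int × Int × Int)}
    (hid : permId ∈ s)
    (hcl : ∀ x ∈ s, ∀ g ∈ gens, permCompose x g ∈ s) :
    ∀ x, Reach gens x → x ∈ s := by
  intro x h
  induction h with
  | id => exact hid
  | step ha hg ih => exact hcl _ ih _ hg

-- ----- Set length helpers -----
theorem length_add_ge {s : PySem.Set (Int × Int × Int × Int)} (x : Int × Int × Int × Int) :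
    s.length ≤ (PySem.Set.add s x).length := by
  simp only [PySem.Set.add]; split_ifs <;> simp

theorem length_add_of_not_mem {s : PySem.Set (Int × Int × Int × Int)}
    {x : Int × Int × Int × Int} (hx : ¬ x ∈ s) :
    (PySem.Set.add s x).length = s.length + 1 := by
  simp [PySem.Set.add, hx]

theorem length_le_update {l : List (Int × Int × Int × Int)} :
    ∀ s : PySem.Set (Int × Int × Int × Int), s.length ≤ (PySem.Set.update s l).length := by
  induction l with
  | nil => intro s; simp [PySem.Set.update]
  | cons y t ih =>
    intro s
    have h1 : s.length ≤ (PySem.Set.add s y).length := length_add_ge y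
    have h2 := ih (PySem.Set.add s y)
    simp only [PySem.Set.update, List.foldl_cons] at h2 ⊢
    omega

theorem length_lt_update {l : List (Int × Int × Int × Int)} {x : Int × Int × Int × Int}
    (hxl : x ∈ l) :
    ∀ s : PySem.Set (Int × Int × Int × Int), x ∉ s → s.length < (PySem.Set.update s l).length := by
  induction l with
  | nil => cases hxl
  | cons y t ih =>
    intro s hxs
    rcases List.mem_cons.mp hxl with rfl | hxt
    · have h1 : (PySem.Set.add s x).length = s.length + 1 := length_add_of_not_mem hxs
      have h2 := length_le_update (l := t) (PySem.Set.add s x)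
      simp only [PySem.Set.update, List.foldl_cons] at h2 ⊢
      omega
    · by_cases hy : x ∈ PySem.Set.add s y
      · -- then x = y or x ∈ s; x ∉ s so x = y… but x ∈ add s y could only be via x ∈ s or x = y
        rcases (PySem.Set.mem_add s y x).mp hy with h | rfl
        · exact absurd h hxs
        · have h1 : (PySem.Set.add s x).length = s.length + 1 := length_add_of_not_mem hxs
          have h2 := length_le_update (l := t) (PySem.Set.add s x)
          simp only [PySem.Set.update, List.foldl_cons] at h2 ⊢
          omega
      · have h1 : s.length ≤ (PySem.Set.add s y).length := length_add_ge y
        have h2 := ih hxt (PySem.Set.add s y) hy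
        simp only [PySem.Set.update, List.foldl_cons] at h2 ⊢
        omega

-- ----- A-side: the inner for-loop -----
theorem foldlA_spec (gens : List (Int × Int × Int × Int)) (a : Int × Int × Int × Int)
    (ha : Reach gens a) (hag : goodP a) :
    ∀ (gs : List (Int × Int × Int × Int))
      (seen : PySem.Set (Int × Int × Int × Int)) (q : List (Int × Int × Int × Int)),
      (∀ g ∈ gs, g ∈ gens) →
      seen.Nodup → q.Nodup → (∀ x ∈ q, x ∈ seen) →
      (∀ x ∈ seen, Reach gens x) → (∀ x ∈ seen, goodP x) →
      ((gs.foldl (stepA a) (seen, q)).1.Nodup ∧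
       (gs.foldl (stepA a) (seen, q)).2.Nodup ∧
       (∀ x ∈ (gs.foldl (stepA a) (seen, q)).2, x ∈ (gs.foldl (stepA a) (seen, q)).1) ∧
       (∀ x ∈ (gs.foldl (stepA a) (seen, q)).1, Reach gens x) ∧
       (∀ x ∈ (gs.foldl (stepA a) (seen, q)).1, goodP x) ∧
       (∀ x ∈ seen, x ∈ (gs.foldl (stepA a) (seen, q)).1) ∧
       (∀ x ∈ (gs.foldl (stepA a) (seen, q)).1, x ∉ (gs.foldl (stepA a) (seen, q)).2 → x ∈ seen ∧ x ∉ q) ∧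
       (∀ g ∈ gs, permCompose a g ∈ (gs.foldl (stepA a) (seen, q)).1) ∧
       (gs.foldl (stepA a) (seen, q)).1.length + q.length = seen.length + (gs.foldl (stepA a) (seen, q)).2.length) := by
  intro gs
  induction gs with
  | nil =>
    intro seen q hgs hsn hqn hqs hr hg
    simp only [List.foldl_nil]
    refine ⟨hsn, hqn, hqs, hr, hg, fun x hx => hx,
      fun x hx hnx => ⟨hx, hnx⟩, ?_, ?_⟩ <;> simp
  | cons g gs ih =>
    intro seen q hgs hsn hqn hqs hr hg
    have hggens : g ∈ gens := hgs g List.mem_cons_self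
    by_cases hb : permCompose a g ∈ seen
    · have hstep : stepA a (seen, q) g = (seen, q) := by
        simp only [stepA]
        rw [if_pos]
        exact (PySem.Set.contains_iff _ _).mpr hb
      rw [List.foldl_cons, hstep]
      obtain ⟨c1, c2, c3, c4, c5, c6, c7, c8, c9⟩ :=
        ih seen q (fun g' hg' => hgs g' (List.mem_cons_of_mem _ hg')) hsn hqn hqs hr hg
      refine ⟨c1, c2, c3, c4, c5, c6, c7, ?_, c9⟩
      intro g' hg'
      rcases List.mem_cons.mp hg' with rfl | hg'
      · exact c6 _ hb
      · exact c8 g' hg'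
    · have hstep : stepA a (seen, q) g =
          (PySem.Set.add seen (permCompose a g), permCompose a g :: q) := by
        simp only [stepA]
        rw [if_neg]
        intro h
        exact hb ((PySem.Set.contains_iff _ _).mp h)
      rw [List.foldl_cons, hstep]
      have hbq : permCompose a g ∉ q := fun h => hb (hqs _ h)
      have hsn' : (PySem.Set.add seen (permCompose a g)).Nodup :=
        PySem.Set.nodup_add _ _ hsn
      have hqn' : (permCompose a g :: q).Nodup := List.nodup_cons.mpr ⟨hbq, hqn⟩
      have hqs' : ∀ x ∈ permCompose a g :: q, x ∈ PySem.Set.add seen (permCompose a g) := by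
        intro x hx
        rcases List.mem_cons.mp hx with rfl | hx
        · exact (PySem.Set.mem_add _ _ _).mpr (Or.inr rfl)
        · exact (PySem.Set.mem_add _ _ _).mpr (Or.inl (hqs _ hx))
      have hr' : ∀ x ∈ PySem.Set.add seen (permCompose a g), Reach gens x := by
        intro x hx
        rcases (PySem.Set.mem_add _ _ _).mp hx with hx | rfl
        · exact hr _ hx
        · exact Reach.step ha hggens
      have hg' : ∀ x ∈ PySem.Set.add seen (permCompose a g), goodP x := by
        intro x hx
        rcases (PySem.Set.mem_add _ _ _).mp hx with hx | rfl
        · exact hg _ hx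
        · exact goodP_compose hag
      obtain ⟨c1, c2, c3, c4, c5, c6, c7, c8, c9⟩ :=
        ih (PySem.Set.add seen (permCompose a g)) (permCompose a g :: q)
          (fun g' hg' => hgs g' (List.mem_cons_of_mem _ hg')) hsn' hqn' hqs' hr' hg'
      refine ⟨c1, c2, c3, c4, c5, ?_, ?_, ?_, ?_⟩
      · intro x hx
        exact c6 _ ((PySem.Set.mem_add _ _ _).mpr (Or.inl hx))
      · intro x hx hnx
        obtain ⟨hx', hnq'⟩ := c7 x hx hnx
        rcases (PySem.Set.mem_add _ _ _).mp hx' with hx'' | rfl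
        · exact ⟨hx'', fun h => hnq' (List.mem_cons_of_mem _ h)⟩
        · exact absurd List.mem_cons_self hnq'
      · intro g' hg'
        rcases List.mem_cons.mp hg' with rfl | hg'
        · exact c6 _ ((PySem.Set.mem_add _ _ _).mpr (Or.inr rfl))
        · exact c8 g' hg'
      · have hlen : (PySem.Set.add seen (permCompose a g)).length = seen.length + 1 :=
          length_add_of_not_mem hb
        simp only [List.length_cons] at c9
        omega

-- ----- A-side: the while-loop -----
theorem loopA_spec (gens : List (Int × Int × Int × Int)) :
    ∀ (f : Nat) (seen : PySem.Set (Int × Int × Int × Int)) (q : List (Int × Int × Int × Int)),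
      seen.Nodup → q.Nodup → (∀ x ∈ q, x ∈ seen) → permId ∈ seen →
      (∀ x ∈ seen, Reach gens x) → (∀ x ∈ seen, goodP x) →
      (∀ x ∈ seen, x ∉ q → ∀ g ∈ gens, permCompose x g ∈ seen) →
      q.length + 256 ≤ f + seen.length →
      ((loopA gens f seen q).Nodup ∧
       (∀ x, x ∈ loopA gens f seen q ↔ Reach gens x) ∧
       (∀ x ∈ loopA gens f seen q, goodP x)) := by
  intro f
  induction f with
  | zero =>
    intro seen q hsn hqn hqs hid hr hg hcl hfuel
    have hle := length_le_256 hsn hg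
    have hq0 : q = [] := List.length_eq_zero_iff.mp (by omega)
    subst hq0
    have hclosed : ∀ x ∈ seen, ∀ g ∈ gens, permCompose x g ∈ seen :=
      fun x hx => hcl x hx (List.not_mem_nil)
    exact ⟨hsn, fun x => ⟨hr x, reach_mem hid hclosed x⟩, hg⟩
  | succ f ih =>
    intro seen q hsn hqn hqs hid hr hg hcl hfuel
    match q with
    | [] =>
      have hclosed : ∀ x ∈ seen, ∀ g ∈ gens, permCompose x g ∈ seen :=
        fun x hx => hcl x hx (List.not_mem_nil)
      exact ⟨hsn, fun x => ⟨hr x, reach_mem hid hclosed x⟩, hg⟩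
    | a :: rest =>
      have haseen : a ∈ seen := hqs a List.mem_cons_self
      have hanr : a ∉ rest := (List.nodup_cons.mp hqn).1
      obtain ⟨c1, c2, c3, c4, c5, c6, c7, c8, c9⟩ :=
        foldlA_spec gens a (hr a haseen) (hg a haseen) gens seen rest
          (fun g hg => hg) hsn (List.nodup_cons.mp hqn).2
          (fun x hx => hqs x (List.mem_cons_of_mem _ hx)) hr hg
      show (loopA gens (f + 1) seen (a :: rest)).Nodup ∧ _
      simp only [loopA]
      apply ih _ _ c1 c2 c3 (c6 _ hid) c4 c5
      · intro x hx hnx g hgg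
        obtain ⟨hxseen, hxnr⟩ := c7 x hx hnx
        by_cases hxa : x = a
        · subst hxa; exact c8 g hgg
        · exact c6 _ (hcl x hxseen (by simp [hxa, hxnr]) g hgg)
      · simp only [List.length_cons] at hfuel
        omega

-- ----- B-side -----
theorem mem_roundB {gens : List (Int × Int × Int × Int)}
    {seen : PySem.Set (Int × Int × Int × Int)} {x : Int × Int × Int × Int} :
    x ∈ roundB gens seen ↔ ∃ a ∈ seen, ∃ g ∈ gens, x = permCompose a g := by
  simp only [roundB, PySem.Set.mem_ofList, List.mem_flatMap, List.mem_map]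
  constructor
  · rintro ⟨a, ha, g, hg, rfl⟩; exact ⟨a, ha, g, hg, rfl⟩
  · rintro ⟨a, ha, g, hg, rfl⟩; exact ⟨a, ha, g, hg, rfl⟩

theorem loopB_spec (gens : List (Int × Int × Int × Int)) :
    ∀ (f : Nat) (seen : PySem.Set (Int × Int × Int × Int)),
      seen.Nodup → permId ∈ seen →
      (∀ x ∈ seen, Reach gens x) → (∀ x ∈ seen, goodP x) →
      256 < f + seen.length →
      ((loopB gens f seen).Nodup ∧
       (∀ x, x ∈ loopB gens f seen ↔ Reach gens x) ∧
       (∀ x ∈ loopB gens f seen, goodP x)) := by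
  intro f
  induction f with
  | zero =>
    intro seen hsn hid hr hg hfuel
    have := length_le_256 hsn hg
    omega
  | succ f ih =>
    intro seen hsn hid hr hg hfuel
    by_cases hsub : PySem.Set.issubset (roundB gens seen) seen = true
    · have hres : loopB gens (f + 1) seen = seen := by
        simp only [loopB, hsub, if_pos]
      rw [hres]
      have hclosed : ∀ x ∈ seen, ∀ g ∈ gens, permCompose x g ∈ seen := by
        intro x hx g hgg
        exact (PySem.Set.issubset_iff _ _).mp hsub _ (mem_roundB.mpr ⟨x, hx, g, hgg, rfl⟩)
      exact ⟨hsn, fun x => ⟨hr x, reach_mem hid hclosed x⟩, hg⟩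
    · have hres : loopB gens (f + 1) seen =
          loopB gens f (PySem.Set.update seen (roundB gens seen)) := by
        simp only [loopB, hsub, if_neg, Bool.false_eq_true, not_false_iff]
      rw [hres]
      have hx : ∃ x ∈ roundB gens seen, x ∉ seen := by
        by_contra hcon
        push Not at hcon
        exact hsub ((PySem.Set.issubset_iff _ _).mpr hcon)
      obtain ⟨x, hxr, hxs⟩ := hx
      have hlt := length_lt_update hxr seen hxs
      apply ih _ (PySem.Set.nodup_update _ _ hsn)
        ((PySem.Set.mem_update _ _ _).mpr (Or.inl hid))
      · intro y hy
        rcases (PySem.Set.mem_update _ _ _).mp hy with hy | hy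
        · exact hr _ hy
        · obtain ⟨a, hav, g, hgg, rfl⟩ := mem_roundB.mp hy
          exact Reach.step (hr _ hav) hgg
      · intro y hy
        rcases (PySem.Set.mem_update _ _ _).mp hy with hy | hy
        · exact hg _ hy
        · obtain ⟨a, hav, g, hgg, rfl⟩ := mem_roundB.mp hy
          exact goodP_compose (hg _ hav)
      · omega

-- ----- the canonicalization: same set (nodup, same members, components in [0,4)) ⇒ same sorted list -----
theorem sortKey_inj {a b : Int × Int × Int × Int} (hga : goodP a) (hgb : goodP b)
    (h : ((a.1 * 4 + a.2.1) * 4 + a.2.2.1) * 4 + a.2.2.2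
       = ((b.1 * 4 + b.2.1) * 4 + b.2.2.1) * 4 + b.2.2.2) : a = b := by
  obtain ⟨a1, a2, a3, a4⟩ := a
  obtain ⟨b1, b2, b3, b4⟩ := b
  obtain ⟨ha1, ha2, ha3, ha4⟩ := hga
  obtain ⟨hb1, hb2, hb3, hb4⟩ := hgb
  simp only at ha1 ha2 ha3 ha4 hb1 hb2 hb3 hb4 h ⊢
  have e1 : a1 = b1 := by omega
  have e2 : a2 = b2 := by omega
  have e3 : a3 = b3 := by omega
  have e4 : a4 = b4 := by omega
  rw [e1, e2, e3, e4]

theorem sortPerm_eq {l1 l2 : List (Int × Int × Int × Int)}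
    (h1 : l1.Nodup) (h2 : l2.Nodup) (hm : ∀ x, x ∈ l1 ↔ x ∈ l2)
    (hg : ∀ x ∈ l1, goodP x) : sortPerm l1 = sortPerm l2 := by
  have hperm : l1.Perm l2 := (List.perm_ext_iff_of_nodup h1 h2).mpr hm
  have hp1 : (PySem.List.sorted l1
      (fun p => ((p.1 * 4 + p.2.1) * 4 + p.2.2.1) * 4 + p.2.2.2) false).Perm l1 :=
    PySem.List.sorted_perm l1 _ false
  have hnd : (PySem.List.sorted l1
      (fun p => ((p.1 * 4 + p.2.1) * 4 + p.2.2.1) * 4 + p.2.2.2) false).Nodup :=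
    hp1.nodup_iff.mpr h1
  have hle := PySem.List.sorted_pairwise l1
      (fun p => ((p.1 * 4 + p.2.1) * 4 + p.2.2.1) * 4 + p.2.2.2)
  have hne : (PySem.List.sorted l1
      (fun p => ((p.1 * 4 + p.2.1) * 4 + p.2.2.1) * 4 + p.2.2.2) false).Pairwise (· ≠ ·) :=
    hnd
  have hlt : (PySem.List.sorted l1
      (fun p => ((p.1 * 4 + p.2.1) * 4 + p.2.2.1) * 4 + p.2.2.2) false).Pairwise
      (fun a b => ((a.1 * 4 + a.2.1) * 4 + a.2.2.1) * 4 + a.2.2.2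
                < ((b.1 * 4 + b.2.1) * 4 + b.2.2.1) * 4 + b.2.2.2) := by
    refine (hle.and hne).imp_of_mem ?_
    intro a b hma hmb hab
    have hga := hg a ((PySem.List.mem_sorted _ _ _ _).mp hma)
    have hgb := hg b ((PySem.List.mem_sorted _ _ _ _).mp hmb)
    rcases lt_or_eq_of_le hab.1 with h | h
    · exact h
    · exact absurd (sortKey_inj hga hgb h) hab.2
  have := PySem.List.sorted_eq_of_perm_of_pairwise_lt l2
      (PySem.List.sorted l1 (fun p => ((p.1 * 4 + p.2.1) * 4 + p.2.2.1) * 4 + p.2.2.2) false)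
      (fun p => ((p.1 * 4 + p.2.1) * 4 + p.2.2.1) * 4 + p.2.2.2)
      (hp1.trans hperm) hlt
  simpa [sortPerm] using this.symm

theorem ofList_id : PySem.Set.ofList [permId] = [permId] := by decide

theorem subgroup_generated_py_spec : Claim_equal_subgroup_generated_py := by
  intro gens hdom hpre
  unfold Spec_subgroup_generated_py subgroup_generated_py subgroup_generated_py_alt
  rw [ofList_id]
  have hsn : ([permId] : List (Int × Int × Int × Int)).Nodup := by decide
  have hid : permId ∈ ([permId] : List (Int × Int × Int × Int)) := List.mem_cons_self
  have hr : ∀ x ∈ ([permId] : List (Int × Int × Int × Int)), Reach gens x := by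
    intro x hx
    rcases List.mem_cons.mp hx with rfl | hx
    · exact Reach.id
    · cases hx
  have hg : ∀ x ∈ ([permId] : List (Int × Int × Int × Int)), goodP x := by
    intro x hx
    rcases List.mem_cons.mp hx with rfl | hx
    · exact goodP_id
    · cases hx
  obtain ⟨a1, a2, a3⟩ := loopA_spec gens 300 [permId] [permId] hsn hsn (fun x hx => hx) hid hr hg
    (fun x hx hnx => absurd hx hnx) (by simp)
  obtain ⟨b1, b2, b3⟩ := loopB_spec gens 300 [permId] hsn hid hr hg (by simp)
  exact sortPerm_eq a1 b1 (fun x => (a2 x).trans (b2 x).symm) a3
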